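-- pv_equiv track=rewrite | github.com/chata/mcp-bedrock-kb | src/bedrock_kb_mcp/utils.py | sanitize_s3_key
-- ===== SOURCE A (Python) =====
-- def sanitize_s3_key(key: str) -> str:
--     """Sanitize an S3 object key.
--
--     Args:
--         key: S3 object key
--
--     Returns:
--         Sanitized key
--     """
--     key = key.strip()
--
--     key = key.replace("\\", "/")
--
--     while "//" in key:
--         key = key.replace("//", "/")
--
--     key = key.lstrip("/")
--
--     invalid_chars = ["<", ">", "|", ":", "*", "?", '"']
--     for char in invalid_chars:
--         key = key.replace(char, "_")
--
--     return key
-- ===== SOURCE B (Python) =====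
-- def sanitize_s3_key(key: str) -> str:
--     """Sanitize an S3 object key in a single stateful scan."""
--     out = []
--     for c in key.strip():
--         if c == '\\':
--             c = '/'
--         elif c in '<>|:*?"':
--             c = '_'
--         if c == '/':
--             if out and out[-1] != '/':
--                 out.append('/')
--         else:
--             out.append(c)
--     return ''.join(out)
-- ===== Notes on version B (the rewrite author's own statement) =====
-- stated objective: alternative
-- what changed: A's five sequential passes (strip, backslash replacement, a while loop repeatedly collapsing doubled slashes, stripping leading slashes, then seven invalid-character replaces) are fused into one stateful left-to-right scan that translates each character and appends it, skipping leading slashes and collapsing slash runs on the fly.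
import Mathlib
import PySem

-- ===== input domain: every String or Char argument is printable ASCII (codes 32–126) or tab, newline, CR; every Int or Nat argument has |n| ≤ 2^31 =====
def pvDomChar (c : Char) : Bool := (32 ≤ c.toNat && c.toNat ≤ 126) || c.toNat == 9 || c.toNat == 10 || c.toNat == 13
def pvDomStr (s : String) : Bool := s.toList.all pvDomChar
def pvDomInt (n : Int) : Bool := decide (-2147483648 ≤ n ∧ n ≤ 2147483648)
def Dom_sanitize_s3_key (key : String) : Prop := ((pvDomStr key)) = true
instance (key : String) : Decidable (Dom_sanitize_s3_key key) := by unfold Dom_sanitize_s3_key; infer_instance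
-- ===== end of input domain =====

-- B replaces A's five-pass pipeline (strip / replace / while-collapse / lstrip / 7 replaces) by one stateful scan; objective: alternative decomposition.

-- ===== PORT A =====
-- One pass of s.replace("//", "/"): needed by the port's termination proof.
def pvRep2 : List Char → List Char
  | [] => []
  | [c] => [c]
  | a :: b :: t => if a = '/' ∧ b = '/' then '/' :: pvRep2 t else a :: pvRep2 (b :: t)

lemma pvGo2 (fuel : Nat) (l acc : List Char) (h : l.length ≤ fuel) :
    PySem.Chars.replace.go ['/', '/'] ['/'] fuel l acc = acc.reverse ++ pvRep2 l := by
  induction fuel generalizing l acc with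
  | zero =>
    have : l = [] := List.eq_nil_of_length_eq_zero (Nat.le_zero.mp h)
    subst this; simp [PySem.Chars.replace.go, pvRep2]
  | succ n ih =>
    match l with
    | [] => simp [PySem.Chars.replace.go, pvRep2]
    | c :: t =>
      rw [PySem.Chars.replace.go]
      by_cases hp : (['/', '/'] : List Char).isPrefixOf (c :: t) = true
      · match t with
        | [] => simp [List.isPrefixOf] at hp
        | b :: t2 =>
          simp only [List.isPrefixOf, Bool.and_eq_true, beq_iff_eq] at hp
          obtain ⟨hc, hb, -⟩ := hp
          subst hc; subst hb
          rw [if_pos (by simp [List.isPrefixOf])]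
          show PySem.Chars.replace.go ['/', '/'] ['/'] n t2 ([] ++ ['/'] ++ acc) = _
          rw [ih t2 _ (by simp at h; omega)]
          simp [pvRep2]
      · rw [if_neg hp]
        rw [ih t (c :: acc) (Nat.le_of_succ_le_succ h)]
        have hr : pvRep2 (c :: t) = c :: pvRep2 t := by
          match t with
          | [] => simp [pvRep2]
          | b :: t2 =>
            have : ¬ (c = '/' ∧ b = '/') := by
              rintro ⟨rfl, rfl⟩; simp [List.isPrefixOf] at hp
            simp [pvRep2, this]
        simp [hr]

lemma pvReplace2_eq (l : List Char) :
    PySem.Chars.replace l ['/', '/'] ['/'] = pvRep2 l := by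
  rw [PySem.Chars.replace, if_neg (by simp), pvGo2 l.length l [] le_rfl]; simp

lemma pvRep2_len_le (l : List Char) : (pvRep2 l).length ≤ l.length := by
  induction l using pvRep2.induct with
  | case1 => simp [pvRep2]
  | case2 c => simp [pvRep2]
  | case3 a b t hab ih => simp only [pvRep2, if_pos hab]; simp at ih ⊢; omega
  | case4 a b t hab ih => simp only [pvRep2, if_neg hab]; simp at ih ⊢; omega

lemma pvRep2_len_lt (l : List Char) (h : ['/', '/'] <:+: l) :
    (pvRep2 l).length < l.length := by
  induction l using pvRep2.induct with
  | case1 => exact absurd h.length_le (by simp)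
  | case2 c => exact absurd h.length_le (by simp)
  | case3 a b t hab _ =>
    have := pvRep2_len_le t
    simp only [pvRep2, if_pos hab]; simp; omega
  | case4 a b t hab ih =>
    have h2 : ['/', '/'] <:+: b :: t := by
      rcases (List.infix_cons_iff).mp h with hp | h2
      · rcases hp with ⟨r, hr⟩
        injection hr with h1 hr
        injection hr with h2 _
        exact absurd ⟨h1.symm, h2.symm⟩ hab
      · exact h2
    have := ih h2
    simp only [pvRep2, if_neg hab]; simp at this ⊢; omega

-- A's "while '//' in key: key = key.replace('//', '/')" loop.
def pvCollapseA (l : List Char) : List Char :=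
  if h : PySem.Chars.isIn ['/', '/'] l = true then
    pvCollapseA (PySem.Chars.replace l ['/', '/'] ['/'])
  else l
termination_by l.length
decreasing_by
  rw [pvReplace2_eq]
  exact pvRep2_len_lt l ((PySem.Chars.isIn_iff_infix _ _).mp h)

def pvInvalidChars : List Char := ['<', '>', '|', ':', '*', '?', '"']

def sanitize_s3_key (key : String) : String :=
  -- key = key.strip()
  let k0 := PySem.Chars.strip key.toList
  -- key = key.replace("\\", "/")
  let k1 := PySem.Chars.replace k0 ['\\'] ['/']
  -- while "//" in key: key = key.replace("//", "/")
  let k2 := pvCollapseA k1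
  -- key = key.lstrip("/")   (hand port: lstrip with the one-char set "/" drops exactly the leading '/'s; exact)
  let k3 := k2.dropWhile (fun c => c == '/')
  -- for char in invalid_chars: key = key.replace(char, "_")
  let k4 := pvInvalidChars.foldl (fun s c => PySem.Chars.replace s [c] ['_']) k3
  String.mk k4

-- ===== PORT B =====
-- One loop body: translate the char, then append, collapsing '/' runs and skipping leading '/'s.
def pvStep (acc : List Char) (c : Char) : List Char :=
  let c1 := if c = '\\' then '/'
            else if (['<', '>', '|', ':', '*', '?', '"'] : List Char).contains c then '_'
            else c
  if c1 = '/' then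
    if acc ≠ [] ∧ acc.getLast? ≠ some '/' then acc ++ ['/'] else acc
  else acc ++ [c1]

def sanitize_s3_key_alt (key : String) : String :=
  String.mk ((PySem.Chars.strip key.toList).foldl pvStep [])

-- ===== PRECONDITION & SPEC =====
def Spec_sanitize_s3_key (key : String) (out : String) : Prop := out = sanitize_s3_key_alt key
instance (key : String) (out : String) : Decidable (Spec_sanitize_s3_key key out) := by unfold Spec_sanitize_s3_key; infer_instance

-- ===== CLAIM (what is proved, stated in full; the proofs are below) =====
def Claim_equal_sanitize_s3_key : Prop := ∀ (key : String), Dom_sanitize_s3_key key → Spec_sanitize_s3_key key (sanitize_s3_key key)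

-- ===== LEMMAS AND PROOFS =====

-- the common normal form: state = "previous emitted char is a slash (or nothing emitted yet)"
def pvF : Bool → List Char → List Char
  | _, [] => []
  | true, c :: t => if c = '/' then pvF true t else c :: pvF false t
  | false, c :: t => if c = '/' then '/' :: pvF true t else c :: pvF false t

def pvBs (c : Char) : Char := if c = '\\' then '/' else c
def pvG (c : Char) : Char := if c ∈ pvInvalidChars then '_' else c

lemma pvGo1 (c d : Char) (fuel : Nat) (l acc : List Char) (h : l.length ≤ fuel) :
    PySem.Chars.replace.go [c] [d] fuel l acc
      = acc.reverse ++ l.map (fun x => if x = c then d else x) := by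
  induction fuel generalizing l acc with
  | zero =>
    have : l = [] := List.eq_nil_of_length_eq_zero (Nat.le_zero.mp h)
    subst this; simp [PySem.Chars.replace.go]
  | succ n ih =>
    match l with
    | [] => simp [PySem.Chars.replace.go]
    | x :: t =>
      rw [PySem.Chars.replace.go]
      by_cases hp : ([c] : List Char).isPrefixOf (x :: t) = true
      · simp only [List.isPrefixOf, Bool.and_eq_true, beq_iff_eq] at hp
        obtain ⟨hc, -⟩ := hp
        rw [if_pos (by simp [List.isPrefixOf, hc])]
        show PySem.Chars.replace.go [c] [d] n t ([d] ++ acc) = _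
        rw [ih t _ (Nat.le_of_succ_le_succ h)]
        simp [hc]
      · have hx : ¬ x = c := by
          intro hxc; exact hp (by simp [List.isPrefixOf, hxc])
        rw [if_neg hp, ih t (x :: acc) (Nat.le_of_succ_le_succ h)]
        simp [hx]

lemma pvReplace1_eq (c d : Char) (s : List Char) :
    PySem.Chars.replace s [c] [d] = s.map (fun x => if x = c then d else x) := by
  rw [PySem.Chars.replace, if_neg (by simp), pvGo1 c d s.length s [] le_rfl]; simp

lemma pvHead?_rep2 (l : List Char) : (pvRep2 l).head? = l.head? := by
  induction l using pvRep2.induct with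
  | case1 => rfl
  | case2 c => rfl
  | case3 a b t hab _ => obtain ⟨rfl, rfl⟩ := hab; simp [pvRep2]
  | case4 a b t hab _ => simp [pvRep2, if_neg hab]

lemma pvF_true_of_head (x : List Char) (h : x.head? ≠ some '/') : pvF true x = pvF false x := by
  match x with
  | [] => rfl
  | c :: t =>
    have hc : ¬ c = '/' := by simpa using h
    simp [pvF, hc]

lemma pvF_rep2 (l : List Char) :
    pvF true (pvRep2 l) = pvF true l ∧ pvF false (pvRep2 l) = pvF false l := by
  induction l using pvRep2.induct with
  | case1 => exact ⟨rfl, rfl⟩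
  | case2 c => exact ⟨rfl, rfl⟩
  | case3 a b t hab ih =>
    obtain ⟨rfl, rfl⟩ := hab
    simp [pvRep2, pvF, ih.1]
  | case4 a b t hab ih =>
    simp only [pvRep2, if_neg hab]
    by_cases ha : a = '/'
    · subst ha
      have hb : ¬ b = '/' := fun hb => hab ⟨rfl, hb⟩
      have hh : (pvRep2 (b :: t)).head? ≠ some '/' := by
        rw [pvHead?_rep2]; simpa using hb
      constructor
      · rw [pvF, if_pos rfl, pvF, if_pos rfl]
        rw [pvF_true_of_head _ hh, pvF_true_of_head _ (by simpa using hb)]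
        exact ih.2
      · rw [pvF, if_pos rfl, pvF, if_pos rfl]
        rw [pvF_true_of_head _ hh, pvF_true_of_head _ (by simpa using hb)]
        rw [ih.2]
    · simp [pvF, ha, ih.2]

lemma pvF_false_of_not_infix (l : List Char) (h : ¬ ['/', '/'] <:+: l) : pvF false l = l := by
  induction l with
  | nil => rfl
  | cons c t ih =>
    have ht : ¬ ['/', '/'] <:+: t := fun h2 => h (h2.trans (List.suffix_cons c t).isInfix)
    by_cases hc : c = '/'
    · subst hc
      have hh : t.head? ≠ some '/' := by
        intro hh
        match t, hh with
        | c2 :: t2, hh =>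
          have : c2 = '/' := by simpa using hh
          subst this
          exact h ⟨[], t2, rfl⟩
      rw [pvF, if_pos rfl, pvF_true_of_head _ hh, ih ht]
    · rw [pvF, if_neg hc, ih ht]

lemma pvCollapseA_eq (l : List Char) : pvCollapseA l = pvF false l := by
  induction l using pvCollapseA.induct with
  | case1 l h ih =>
    rw [pvCollapseA, dif_pos h, ih, pvReplace2_eq, (pvF_rep2 l).2]
  | case2 l h =>
    rw [pvCollapseA, dif_neg h]
    exact (pvF_false_of_not_infix l (by
      intro hi
      exact h ((PySem.Chars.isIn_iff_infix _ _).mpr hi))).symm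

lemma pvF_true_head (m : List Char) : (pvF true m).head? ≠ some '/' := by
  induction m with
  | nil => simp [pvF]
  | cons c t ih =>
    by_cases hc : c = '/'
    · rw [pvF, if_pos hc]; exact ih
    · rw [pvF, if_neg hc]; simpa using hc

lemma pvDropWhile_of_head (x : List Char) (h : x.head? ≠ some '/') :
    x.dropWhile (fun c => c == '/') = x := by
  match x with
  | [] => rfl
  | c :: t =>
    have hc : (c == '/') = false := by simpa using h
    simp [List.dropWhile, hc]

lemma pvF_true_eq_drop (m : List Char) :
    pvF true m = (pvF false m).dropWhile (fun c => c == '/') := by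
  match m with
  | [] => rfl
  | c :: t =>
    by_cases hc : c = '/'
    · rw [pvF, if_pos hc, pvF, if_pos hc]
      simp only [List.dropWhile]
      rw [(pvDropWhile_of_head _ (pvF_true_head t))]
      simp
    · rw [pvF, if_neg hc, pvF, if_neg hc]
      have hc' : (c == '/') = false := by simpa using hc
      simp [hc']

lemma pvG_slash (c : Char) : pvG c = '/' ↔ c = '/' := by
  by_cases h : c ∈ pvInvalidChars
  · simp only [pvG, if_pos h]
    constructor
    · intro h2; exact absurd h2 (by decide)
    · rintro rfl; exact absurd h (by decide)
  · simp [pvG, h]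

lemma pvF_map_g (b : Bool) (y : List Char) :
    pvF b (y.map pvG) = (pvF b y).map pvG := by
  induction y generalizing b with
  | nil => cases b <;> rfl
  | cons c t ih =>
    by_cases hc : c = '/'
    · subst hc
      have : pvG '/' = '/' := by decide
      cases b <;> simp [pvF, this, ih]
    · have hg : ¬ pvG c = '/' := fun h => hc ((pvG_slash c).mp h)
      cases b <;> simp [pvF, hc, hg, ih]

set_option maxHeartbeats 1000000 in
lemma pvFold7 (s : List Char) :
    pvInvalidChars.foldl (fun s c => PySem.Chars.replace s [c] ['_']) s = s.map pvG := by
  simp only [pvInvalidChars, List.foldl_cons, List.foldl_nil, pvReplace1_eq, List.map_map]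
  apply List.map_congr_left
  intro a _
  simp only [Function.comp]
  by_cases h : a ∈ pvInvalidChars
  · fin_cases h <;> decide
  · simp only [pvInvalidChars, List.mem_cons, List.not_mem_nil, or_false, not_or] at h
    obtain ⟨h1, h2, h3, h4, h5, h6, h7⟩ := h
    rw [if_neg h1, if_neg h2, if_neg h3, if_neg h4, if_neg h5, if_neg h6, if_neg h7]
    simp [pvG, pvInvalidChars, h1, h2, h3, h4, h5, h6, h7]

lemma pvTr_eq (c : Char) :
    (if c = '\\' then '/'
     else if (['<', '>', '|', ':', '*', '?', '"'] : List Char).contains c then '_'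
     else c) = pvG (pvBs c) := by
  by_cases h1 : c = '\\'
  · subst h1; decide
  · rw [if_neg h1]
    by_cases h2 : (['<', '>', '|', ':', '*', '?', '"'] : List Char).contains c
    · rw [if_pos h2]
      have : c ∈ pvInvalidChars := by simpa [pvInvalidChars] using h2
      have hb : pvBs c = c := by simp [pvBs, h1]
      rw [hb]; simp [pvG, this]
    · rw [if_neg h2]
      have : c ∉ pvInvalidChars := by simpa [pvInvalidChars] using h2
      have hb : pvBs c = c := by simp [pvBs, h1]
      rw [hb]; simp [pvG, this]

lemma pvFoldStep (m : List Char) : ∀ (acc : List Char) (b : Bool),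
    (b = true ↔ (acc = [] ∨ acc.getLast? = some '/')) →
    m.foldl pvStep acc = acc ++ pvF b (m.map (fun c => pvG (pvBs c))) := by
  induction m with
  | nil => intro acc b _; simp [pvF]
  | cons c t ih =>
    intro acc b hb
    rw [List.foldl_cons]
    have hstep : pvStep acc c =
        (if pvG (pvBs c) = '/' then
          if acc ≠ [] ∧ acc.getLast? ≠ some '/' then acc ++ ['/'] else acc
        else acc ++ [pvG (pvBs c)]) := by
      rw [pvStep, pvTr_eq]
    by_cases hc : pvG (pvBs c) = '/'
    · cases b with
      | true =>
        have hacc : ¬ (acc ≠ [] ∧ acc.getLast? ≠ some '/') := by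
          rcases hb.mp rfl with h | h
          · intro hx; exact hx.1 h
          · intro hx; exact hx.2 h
        rw [hstep, if_pos hc, if_neg hacc, ih acc true hb]
        simp [pvF, hc]
      | false =>
        have hacc : acc ≠ [] ∧ acc.getLast? ≠ some '/' := by
          by_contra hx
          rcases not_and_or.mp hx with h | h
          · exact absurd (hb.mpr (Or.inl (not_not.mp h))) (by simp)
          · exact absurd (hb.mpr (Or.inr (not_not.mp h))) (by simp)
        rw [hstep, if_pos hc, if_pos hacc,
            ih (acc ++ ['/']) true (by simp)]
        simp [pvF, hc]
    · rw [hstep, if_neg hc,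
          ih (acc ++ [pvG (pvBs c)]) false (by simp [hc])]
      cases b <;> simp [pvF, hc]

lemma pvCore_eq (l : List Char) :
    (pvInvalidChars.foldl (fun s c => PySem.Chars.replace s [c] ['_'])
      ((pvCollapseA (PySem.Chars.replace l ['\\'] ['/'])).dropWhile (fun c => c == '/')))
    = l.foldl pvStep [] := by
  rw [pvFold7, pvCollapseA_eq, pvReplace1_eq, ← pvF_true_eq_drop]
  rw [pvFoldStep l [] true (by simp)]
  have : (l.map (fun c => pvG (pvBs c))) = (l.map (fun x => if x = '\\' then '/' else x)).map pvG := by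
    rw [List.map_map]; rfl
  rw [this, pvF_map_g]
  simp

-- ===== VERDICT (by name: the statement is the Claim_ definition above) =====
theorem sanitize_s3_key_spec : Claim_equal_sanitize_s3_key := by
  intro key _
  unfold Spec_sanitize_s3_key sanitize_s3_key sanitize_s3_key_alt
  exact congrArg String.mk (pvCore_eq (PySem.Chars.strip key.toList))
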